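-- pv_equiv track=rewrite | github.com/pypi-data/pypi-mirror-403 | packages/questmind/questmind-0.3.5.tar.gz/questmind-0.3.5/questmind/pdf_processor.py | is_visual_question
-- ===== SOURCE A (Python) =====
-- def is_visual_question(question: str) -> bool:
--     """
--     Detect if a question is asking about visual content.
--
--     This provides query-level filtering to avoid routing text questions
--     to VLM just because the page has some images.
--     """
--     question_lower = question.lower()
--
--     # Keywords that indicate visual questions
--     visual_keywords = [
--         # Direct visual references
--         'image', 'images', 'picture', 'pictures', 'photo', 'photos',
--         'diagram', 'diagrams', 'chart', 'charts', 'graph', 'graphs',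
--         'figure', 'figures', 'illustration', 'illustrations',
--         'drawing', 'drawings', 'sketch', 'sketches',
--         'visual', 'visually', 'shown', 'depicted', 'depict',
--         'display', 'displayed', 'appear', 'appears', 'look',
--         # Layout/spatial questions
--         'layout', 'arranged', 'positioned',
--         # Color/style questions
--         'color', 'colours', 'colored',
--     ]
--
--     for keyword in visual_keywords:
--         if keyword in question_lower:
--             return True
--
--     return False
-- ===== SOURCE B (Python) =====
-- _BY_FIRST = {
--     'i': ('mage', 'llustration'),
--     'p': ('icture', 'hoto', 'ositioned'),
--     'd': ('iagram', 'rawing', 'epict', 'isplay'),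
--     'c': ('hart', 'olor', 'olours'),
--     'g': ('raph',),
--     'f': ('igure',),
--     'v': ('isual',),
--     's': ('ketch', 'hown'),
--     'a': ('ppear', 'rranged'),
--     'l': ('ook', 'ayout'),
-- }
--
-- def is_visual_question(question: str) -> bool:
--     """Single left-to-right pass with first-letter dispatch over a minimal
--     keyword set (plural/derived forms are redundant: each contains its base)."""
--     ql = question.lower()
--     for i, ch in enumerate(ql):
--         for rest in _BY_FIRST.get(ch, ()):
--             if ql.startswith(rest, i + 1):
--                 return True
--     return False
-- ===== Notes on version B (the rewrite author's own statement) =====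
-- stated objective: alternative
-- what changed: Replaces A's 36 per-keyword substring scans by one left-to-right pass that dispatches on the current character through a first-letter table of a minimal keyword set (plural/derived forms dropped since each contains its base keyword).
import Mathlib
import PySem

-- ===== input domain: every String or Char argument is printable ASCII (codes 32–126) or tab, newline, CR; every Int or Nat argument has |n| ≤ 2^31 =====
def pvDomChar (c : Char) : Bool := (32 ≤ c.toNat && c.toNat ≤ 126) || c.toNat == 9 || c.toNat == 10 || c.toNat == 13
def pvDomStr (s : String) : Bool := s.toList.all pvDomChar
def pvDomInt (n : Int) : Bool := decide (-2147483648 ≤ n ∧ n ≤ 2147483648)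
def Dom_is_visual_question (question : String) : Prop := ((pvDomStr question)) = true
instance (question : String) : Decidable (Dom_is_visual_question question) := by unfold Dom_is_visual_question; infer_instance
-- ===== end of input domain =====

-- B replaces A's 36 per-keyword substring scans by ONE left-to-right pass with a first-letter
-- dispatch over a minimal keyword set (plural/derived forms dropped: each contains its base);
-- alternative decomposition, no speed claim.

-- ===== PORT A =====
-- A's keyword list, in source order.
def visualKeywordsA : List String :=
  ["image", "images", "picture", "pictures", "photo", "photos",
   "diagram", "diagrams", "chart", "charts", "graph", "graphs",
   "figure", "figures", "illustration", "illustrations",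
   "drawing", "drawings", "sketch", "sketches",
   "visual", "visually", "shown", "depicted", "depict",
   "display", "displayed", "appear", "appears", "look",
   "layout", "arranged", "positioned",
   "color", "colours", "colored"]

-- 'for keyword in …: if keyword in question_lower: return True / return False'
def aLoop (ql : String) : List String → Bool
  | [] => false
  | k :: rest => if PySem.Str.isIn k ql then true else aLoop ql rest

def is_visual_question (question : String) : Bool :=
  aLoop (PySem.Str.lower question) visualKeywordsA

-- ===== PORT B =====
-- B's dispatch table _BY_FIRST: first letter ↦ remainders of the minimal keywords ('.get(ch, ())').
def kwsFor (c : Char) : List (List Char) :=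
  if c = 'i' then ["mage".toList, "llustration".toList]
  else if c = 'p' then ["icture".toList, "hoto".toList, "ositioned".toList]
  else if c = 'd' then ["iagram".toList, "rawing".toList, "epict".toList, "isplay".toList]
  else if c = 'c' then ["hart".toList, "olor".toList, "olours".toList]
  else if c = 'g' then ["raph".toList]
  else if c = 'f' then ["igure".toList]
  else if c = 'v' then ["isual".toList]
  else if c = 's' then ["ketch".toList, "hown".toList]
  else if c = 'a' then ["ppear".toList, "rranged".toList]
  else if c = 'l' then ["ook".toList, "ayout".toList]
  else []

-- 'for i, ch in enumerate(ql): for rest in _BY_FIRST.get(ch, ()): if ql.startswith(rest, i+1): return True'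
def bScan : List Char → Bool
  | [] => false
  | c :: t => (kwsFor c).any (fun r => PySem.Chars.startswith t r) || bScan t

def is_visual_question_alt (question : String) : Bool :=
  bScan (PySem.Str.lower question).toList

-- ===== PRECONDITION & SPEC =====
def Spec_is_visual_question (question : String) (out : Bool) : Prop := out = is_visual_question_alt question
instance (question : String) (out : Bool) : Decidable (Spec_is_visual_question question out) := by unfold Spec_is_visual_question; infer_instance

-- ===== CLAIM (what is proved, stated in full; the proofs are below) =====
def Claim_equal_is_visual_question : Prop := ∀ (question : String), Dom_is_visual_question question → Spec_is_visual_question question (is_visual_question question)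

-- ===== LEMMAS AND PROOFS =====

-- B's minimal keyword set, flattened back to full words (proof-side only).
def reducedKws : List String :=
  ["image", "illustration", "picture", "photo", "positioned",
   "diagram", "drawing", "depict", "display",
   "chart", "color", "colours", "graph", "figure", "visual",
   "sketch", "shown", "appear", "arranged", "look", "layout"]

-- A's early-return loop is an existential over the keyword list.
theorem aLoop_eq_true_iff (ql : String) (ks : List String) :
    aLoop ql ks = true ↔ ∃ k ∈ ks, PySem.Str.isIn k ql = true := by
  induction ks with
  | nil => simp [aLoop]
  | cons k rest ih =>
      simp only [aLoop]
      split_ifs with h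
      · simp only [true_iff]
        exact ⟨k, List.mem_cons_self, h⟩
      · rw [ih]
        constructor
        · rintro ⟨k', hm, hi⟩; exact ⟨k', List.mem_cons_of_mem _ hm, hi⟩
        · rintro ⟨k', hm, hi⟩
          rcases List.mem_cons.mp hm with rfl | hm'
          · exact absurd hi h
          · exact ⟨k', hm', hi⟩

-- Every dispatch-table entry, rejoined with its letter, is a reduced keyword.
theorem cons_kwsFor_mem {c : Char} {r : List Char} (h : r ∈ kwsFor c) :
    ∃ k ∈ reducedKws, k.toList = c :: r := by
  unfold kwsFor at h
  split_ifs at h with h1 h2 h3 h4 h5 h6 h7 h8 h9 h10 <;> subst_vars <;> fin_cases h <;> decide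

-- Every reduced keyword splits into its first letter and a dispatch-table entry.
theorem reduced_split_bool :
    reducedKws.all (fun k =>
      match k.toList with
      | [] => false
      | c :: r => (kwsFor c).contains r) = true := by
  decide

theorem reduced_split : ∀ k ∈ reducedKws, ∃ c r, k.toList = c :: r ∧ r ∈ kwsFor c := by
  intro k hk
  have h := List.all_eq_true.mp reduced_split_bool k hk
  cases hkl : k.toList with
  | nil => rw [hkl] at h; simp at h
  | cons c r => rw [hkl] at h; exact ⟨c, r, rfl, by simpa using h⟩

-- B's scan fires iff some reduced keyword is a prefix of some suffix of the text.
theorem bScan_iff (s : List Char) :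
    bScan s = true ↔ ∃ k ∈ reducedKws, ∃ j, k.toList <+: s.drop j := by
  induction s with
  | nil =>
      simp only [bScan, List.drop_nil]
      refine iff_of_false (by simp) ?_
      rintro ⟨k, hk, _, hp⟩
      have hne : ∀ k ∈ reducedKws, String.toList k ≠ [] := by decide
      exact hne k hk (List.prefix_nil.mp hp)
  | cons c t ih =>
      simp only [bScan, Bool.or_eq_true, List.any_eq_true, ih]
      constructor
      · rintro (⟨r, hr, hs⟩ | ⟨k, hk, j, hp⟩)
        · obtain ⟨k, hk, hkl⟩ := cons_kwsFor_mem hr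
          refine ⟨k, hk, 0, ?_⟩
          rw [hkl, List.drop_zero]
          exact List.cons_prefix_cons.mpr ⟨rfl, (PySem.Chars.startswith_iff t r).mp hs⟩
        · exact ⟨k, hk, j + 1, by simpa using hp⟩
      · rintro ⟨k, hk, j, hp⟩
        cases j with
        | zero =>
            obtain ⟨c', r, hkl, hr⟩ := reduced_split k hk
            rw [hkl] at hp
            simp only [List.drop_zero] at hp
            obtain ⟨hc, hpt⟩ := List.cons_prefix_cons.mp hp
            subst hc
            exact Or.inl ⟨r, hr, (PySem.Chars.startswith_iff _ _).mpr hpt⟩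
        | succ j => exact Or.inr ⟨k, hk, j, by simpa using hp⟩

-- Every A keyword has a reduced keyword as a prefix (so occurrence implies occurrence),
-- and every reduced keyword is an A keyword.
theorem a_has_reduced_prefix :
    ∀ k ∈ visualKeywordsA, ∃ b ∈ reducedKws, b.toList <+: k.toList := by
  decide

theorem reduced_subset_a : ∀ b ∈ reducedKws, b ∈ visualKeywordsA := by
  decide

-- ===== VERDICT (by name: the statement is the Claim_ definition above) =====
theorem is_visual_question_spec : Claim_equal_is_visual_question := by
  intro question _
  unfold Spec_is_visual_question is_visual_question is_visual_question_alt
  set ql := PySem.Str.lower question with hql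
  rw [Bool.eq_iff_iff, aLoop_eq_true_iff, bScan_iff]
  constructor
  · rintro ⟨k, hk, hin⟩
    obtain ⟨b, hb, hpre⟩ := a_has_reduced_prefix k hk
    have hkin : k.toList <:+: ql.toList := by
      simpa [PySem.Str.isIn] using (PySem.Chars.isIn_iff_infix k.toList ql.toList).mp
        (by simpa [PySem.Str.isIn] using hin)
    obtain ⟨j, hj⟩ := (PySem.Chars.exists_prefix_drop_iff_isIn k.toList ql.toList).mpr
      (by simpa [PySem.Str.isIn] using hin)
    exact ⟨b, hb, j, hpre.trans hj⟩
  · rintro ⟨b, hb, j, hj⟩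
    refine ⟨b, reduced_subset_a b hb, ?_⟩
    have := (PySem.Chars.exists_prefix_drop_iff_isIn b.toList ql.toList).mp ⟨j, hj⟩
    simpa [PySem.Str.isIn] using this
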